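-- pv_equiv track=rewrite | github.com/GowthamSagar310/CompetitiveProgramming | CodeforcesProblems/cf_139A.py | count
-- ===== SOURCE A (Python) =====
-- def count(pages, arr):
--
--     day = 1
--     while pages > 0:
--         pages -= arr[day-1]
--         if pages <= 0: return day
--         day += 1
--         if day > 7: day = 1
--     return day
-- ===== SOURCE B (Python) =====
-- def count(pages, arr):
--     # O(1): drop whole weeks with one modulo, then scan at most 7 days.
--     if pages <= 0:
--         return 1
--     week = arr[:7]
--     total = sum(week)
--     r = pages % total
--     if r == 0:
--         r = total
--     day = 0
--     acc = 0
--     for v in week: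
--         day += 1
--         acc += v
--         if acc >= r:
--             break
--     return day
-- ===== Notes on version B (the rewrite author's own statement) =====
-- stated objective: alternative
-- what changed: Replaces the day-by-day simulation of every week with one modulo that removes all full weeks at once, followed by a single prefix-sum scan of at most 7 days.
-- outside the precondition, e.g. on count(12, [1, 10, -10, 0, 0, 0, 0]): A returns 2, B returns 1
import Mathlib
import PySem

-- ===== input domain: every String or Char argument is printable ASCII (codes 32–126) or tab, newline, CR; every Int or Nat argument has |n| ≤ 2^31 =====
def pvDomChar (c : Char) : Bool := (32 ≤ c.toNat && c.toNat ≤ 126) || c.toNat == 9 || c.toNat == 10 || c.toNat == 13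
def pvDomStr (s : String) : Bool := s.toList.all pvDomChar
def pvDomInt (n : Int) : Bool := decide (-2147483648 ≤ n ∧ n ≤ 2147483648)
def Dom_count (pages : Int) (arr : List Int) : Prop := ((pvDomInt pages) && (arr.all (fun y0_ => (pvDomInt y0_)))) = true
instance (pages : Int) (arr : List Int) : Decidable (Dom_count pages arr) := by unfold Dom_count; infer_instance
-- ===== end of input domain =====

-- B replaces A's day-by-day simulation of every week by one modulo that removes
-- all full weeks at once, then a single prefix scan of at most 7 days
-- (objective: alternative algorithm, closed-form weekly reduction).

-- ===== PORT A =====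
-- A's while loop as fuelled structural recursion over the same state
-- (pages, day); the fuel and the `none`/fuel-0 fallbacks are totality guards
-- only: under Pre_count they are never reached.
def countLoop : Nat → Int → List Int → Int → Int
  | 0, _, _, day => day
  | fuel + 1, pages, arr, day =>
    if pages > 0 then
      match PySem.List.pyGet? arr (day - 1) with
      | none => day   -- IndexError in Python: excluded by Pre_count
      | some v =>
        if pages - v ≤ 0 then day
        else countLoop fuel (pages - v) arr (if day + 1 > 7 then 1 else day + 1)
    else day

def count (pages : Int) (arr : List Int) : Int :=
  countLoop ((pages.toNat + 2) * 8) pages arr 1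

-- ===== PORT B =====
-- the `for v in week` loop of Source B (day += 1; acc += v; break when acc ≥ r)
def scanB : List Int → Int → Int → Int → Int
  | [], _, _, day => day
  | v :: rest, acc, r, day =>
    if acc + v ≥ r then day + 1 else scanB rest (acc + v) r (day + 1)

def count_alt (pages : Int) (arr : List Int) : Int :=
  if pages ≤ 0 then 1
  else
    let week := PySem.List.slice arr none (some 7)
    let total := week.sum
    let r0 := PySem.Int.mod pages total
    let r := if r0 = 0 then total else r0
    scanB week 0 r 0

-- ===== PRECONDITION & SPEC =====
-- Pre_ admits pages ≤ 0, every input that finishes inside the first week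
-- (pages ≤ sum of the first ≤ 7 entries), and the problem's canonical domain
-- (at least 7 entries, first 7 nonnegative with positive sum).  It excludes
-- inputs that need more than one week when the first 7 entries are not 7
-- nonnegative values: there A diverges (weekly sum ≤ 0), raises IndexError
-- (fewer than 7 entries), or — with a negative among the first 7 — can still
-- return a value that B's modular weekly reduction is not meant to reproduce.
def Pre_count (pages : Int) (arr : List Int) : Prop :=
  pages ≤ 0 ∨ pages ≤ (arr.take 7).sum ∨
    (7 ≤ arr.length ∧ (∀ x ∈ arr.take 7, 0 ≤ x) ∧ 0 < (arr.take 7).sum)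
instance (pages : Int) (arr : List Int) : Decidable (Pre_count pages arr) := by
  unfold Pre_count; infer_instance

def pvWitness_count : Int × List Int := (20, [1, 2, 3, 1, 0, 4, 2])

def Spec_count (pages : Int) (arr : List Int) (out : Int) : Prop := out = count_alt pages arr
instance (pages : Int) (arr : List Int) (out : Int) : Decidable (Spec_count pages arr out) := by unfold Spec_count; infer_instance

-- ===== CLAIM (what is proved, stated in full; the proofs are below) =====
def Claim_equal_count : Prop := ∀ (pages : Int) (arr : List Int), Dom_count pages arr → Pre_count pages arr → Spec_count pages arr (count pages arr)

-- ===== LEMMAS AND PROOFS =====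

theorem slice_take (arr : List Int) :
    PySem.List.slice arr none (some 7) = arr.take 7 := by
  simp [PySem.List.slice]

theorem pyGet_of_take_drop (arr : List Int) (d : Nat) (v : Int) (t : List Int)
    (h : (arr.take 7).drop d = v :: t) :
    PySem.List.pyGet? arr ((d : Int) + 1 - 1) = some v := by
  have h1 : (arr.take 7)[d]? = some v := by
    rw [← List.head?_drop, h, List.head?_cons]
  have h2 : arr[d]? = some v := by
    rcases Nat.lt_or_ge d 7 with hd | hd
    · rwa [List.getElem?_take_of_lt hd] at h1
    · have hlen : (arr.take 7).length ≤ d := by rw [List.length_take]; omega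
      rw [List.getElem?_eq_none hlen] at h1
      simp at h1
  simpa using h2

-- indexing the fixed 7-day prefix with the literal day numbers A's loop uses
theorem pyGet7_0 (a0 a1 a2 a3 a4 a5 a6 : Int) (rest : List Int) :
    PySem.List.pyGet? (a0 :: a1 :: a2 :: a3 :: a4 :: a5 :: a6 :: rest) 0 = some a0 := by
  simp [PySem.List.pyGet?, PySem.List.pyIdx?]; try rw [if_pos (by omega)]; try simp
theorem pyGet7_1 (a0 a1 a2 a3 a4 a5 a6 : Int) (rest : List Int) :
    PySem.List.pyGet? (a0 :: a1 :: a2 :: a3 :: a4 :: a5 :: a6 :: rest) 1 = some a1 := by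
  simp [PySem.List.pyGet?, PySem.List.pyIdx?]; try rw [if_pos (by omega)]; try simp
theorem pyGet7_2 (a0 a1 a2 a3 a4 a5 a6 : Int) (rest : List Int) :
    PySem.List.pyGet? (a0 :: a1 :: a2 :: a3 :: a4 :: a5 :: a6 :: rest) 2 = some a2 := by
  simp [PySem.List.pyGet?, PySem.List.pyIdx?]; try rw [if_pos (by omega)]; try simp
theorem pyGet7_3 (a0 a1 a2 a3 a4 a5 a6 : Int) (rest : List Int) :
    PySem.List.pyGet? (a0 :: a1 :: a2 :: a3 :: a4 :: a5 :: a6 :: rest) 3 = some a3 := by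
  simp [PySem.List.pyGet?, PySem.List.pyIdx?]; try rw [if_pos (by omega)]; try simp
theorem pyGet7_4 (a0 a1 a2 a3 a4 a5 a6 : Int) (rest : List Int) :
    PySem.List.pyGet? (a0 :: a1 :: a2 :: a3 :: a4 :: a5 :: a6 :: rest) 4 = some a4 := by
  simp [PySem.List.pyGet?, PySem.List.pyIdx?]; try rw [if_pos (by omega)]; try simp
theorem pyGet7_5 (a0 a1 a2 a3 a4 a5 a6 : Int) (rest : List Int) :
    PySem.List.pyGet? (a0 :: a1 :: a2 :: a3 :: a4 :: a5 :: a6 :: rest) 5 = some a5 := by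
  simp [PySem.List.pyGet?, PySem.List.pyIdx?]; try rw [if_pos (by omega)]; try simp
theorem pyGet7_6 (a0 a1 a2 a3 a4 a5 a6 : Int) (rest : List Int) :
    PySem.List.pyGet? (a0 :: a1 :: a2 :: a3 :: a4 :: a5 :: a6 :: rest) 6 = some a6 := by
  simp [PySem.List.pyGet?, PySem.List.pyIdx?]; try rw [if_pos (by omega)]; try simp

-- one iteration of A's loop that keeps going
theorem step_cont (f : Nat) (p v : Int) (arr : List Int) (d : Int)
    (hget : PySem.List.pyGet? arr (d - 1) = some v) (h : 0 < p) (h2 : v < p) :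
    countLoop (f + 1) p arr d = countLoop f (p - v) arr (if d + 1 > 7 then 1 else d + 1) := by
  simp only [countLoop]
  rw [if_pos h, hget]
  exact if_neg (by omega)

-- one iteration of A's loop that returns
theorem step_stop (f : Nat) (p v : Int) (arr : List Int) (d : Int)
    (hget : PySem.List.pyGet? arr (d - 1) = some v) (h : 0 < p) (h2 : p - v ≤ 0) :
    countLoop (f + 1) p arr d = d := by
  simp only [countLoop]
  rw [if_pos h, hget]
  exact if_pos h2

theorem step_mid (f : Nat) (p v : Int) (arr : List Int) (d : Int)
    (hget : PySem.List.pyGet? arr (d - 1) = some v) (h : 0 < p) (h2 : v < p)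
    (hd : ¬ d + 1 > 7) :
    countLoop (f + 1) p arr d = countLoop f (p - v) arr (d + 1) := by
  rw [step_cont f p v arr d hget h h2, if_neg hd]

theorem step_wrap (f : Nat) (p v : Int) (arr : List Int) (d : Int)
    (hget : PySem.List.pyGet? arr (d - 1) = some v) (h : 0 < p) (h2 : v < p)
    (hd : d + 1 > 7) :
    countLoop (f + 1) p arr d = countLoop f (p - v) arr 1 := by
  rw [step_cont f p v arr d hget h h2, if_pos hd]

theorem countLoop_nonpos (f : Nat) (p : Int) (arr : List Int) (d : Int) (h : ¬ p > 0) :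
    countLoop (f + 1) p arr d = d := by
  simp only [countLoop]
  exact if_neg h

-- from day d+1 on, with the remaining pages r - acc reachable inside the first
-- week, A's loop is exactly B's prefix scan of the remaining week entries
theorem last_gen : ∀ (t : List Int) (f : Nat) (arr : List Int) (d : Nat) (acc r : Int),
    t = (arr.take 7).drop d → d < 7 → 0 < r - acc → r - acc ≤ t.sum →
    countLoop (f + t.length) (r - acc) arr ((d : Int) + 1) = scanB t acc r (d : Int) := by
  intro t
  induction t with
  | nil =>
    intro f arr d acc r ht hd hpos hle
    simp only [List.sum_nil] at hle
    omega
  | cons v t' ih =>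
    intro f arr d acc r ht hd hpos hle
    rw [List.sum_cons] at hle
    simp only [scanB]
    rw [List.length_cons, ← Nat.add_assoc]
    by_cases hstop : r - acc - v ≤ 0
    · rw [step_stop _ _ v _ ((d : Int) + 1)
        (pyGet_of_take_drop arr d v t' ht.symm) hpos hstop, if_pos (by omega)]
    · have ht' : t' = (arr.take 7).drop (d + 1) := by
        rw [List.drop_add_one_eq_tail_drop, ← ht]
        rfl
      have hd2 : d + 1 < 7 := by
        by_contra hcon
        have hnil : t' = [] := by
          rw [ht']
          exact List.drop_eq_nil_of_le (by rw [List.length_take]; omega)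
        subst hnil
        simp only [List.sum_nil] at hle
        omega
      rw [if_neg (by omega)]
      rw [step_mid _ _ v _ ((d : Int) + 1)
        (pyGet_of_take_drop arr d v t' ht.symm) hpos (by omega) (by omega)]
      have hih := ih f arr (d + 1) (acc + v) r ht' hd2 (by omega) (by omega)
      push_cast at hih
      have e1 : r - (acc + v) = r - acc - v := by ring
      rw [e1] at hih
      exact hih

-- in the last week B's r equals pages, so B is the plain prefix scan
theorem alt_last_gen (p : Int) (arr : List Int)
    (hp : 0 < p) (hle : p ≤ (arr.take 7).sum) :
    count_alt p arr = scanB (arr.take 7) 0 p 0 := by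
  rw [count_alt, if_neg (by omega)]
  simp only [slice_take]
  have hS' : 0 < (arr.take 7).sum := lt_of_lt_of_le hp hle
  have hmod : PySem.Int.mod p (arr.take 7).sum = p % (arr.take 7).sum :=
    PySem.Int.mod_eq_emod_of_pos hS'
  have hr : (if PySem.Int.mod p (arr.take 7).sum = 0 then (arr.take 7).sum
      else PySem.Int.mod p (arr.take 7).sum) = p := by
    rcases lt_or_eq_of_le hle with hlt | heq
    · rw [hmod, Int.emod_eq_of_lt (by omega) hlt]
      rw [if_neg (by omega)]
    · rw [hmod, heq, Int.emod_self, if_pos rfl]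
  rw [hr]

-- A = B whenever pages is exhausted inside the first week
theorem base_case (f : Nat) (p : Int) (arr : List Int)
    (hp : 0 < p) (hle : p ≤ (arr.take 7).sum) :
    countLoop (f + (arr.take 7).length) p arr 1 = count_alt p arr := by
  have h := last_gen (arr.take 7) f arr 0 0 p (by simp) (by norm_num) (by omega)
    (by simpa using hle)
  rw [alt_last_gen p arr hp hle]
  simpa using h

-- a full week of A's loop removes the weekly sum from pages and returns to day 1
theorem week_skip (f : Nat) (p a0 a1 a2 a3 a4 a5 a6 : Int) (rest : List Int)
    (h0 : 0 ≤ a0) (h1 : 0 ≤ a1) (h2 : 0 ≤ a2) (h3 : 0 ≤ a3) (h4 : 0 ≤ a4)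
    (h5 : 0 ≤ a5) (h6 : 0 ≤ a6)
    (hp : a0 + a1 + a2 + a3 + a4 + a5 + a6 < p) :
    countLoop (f + 1 + 1 + 1 + 1 + 1 + 1 + 1) p (a0 :: a1 :: a2 :: a3 :: a4 :: a5 :: a6 :: rest) 1 =
      countLoop f (p - (a0 + a1 + a2 + a3 + a4 + a5 + a6))
        (a0 :: a1 :: a2 :: a3 :: a4 :: a5 :: a6 :: rest) 1 := by
  rw [step_mid _ _ a0 _ 1 (by norm_num [pyGet7_0]) (by omega) (by omega) (by norm_num)]
  rw [step_mid _ _ a1 _ (1+1) (by norm_num [pyGet7_1]) (by omega) (by omega) (by norm_num)]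
  rw [step_mid _ _ a2 _ (1+1+1) (by norm_num [pyGet7_2]) (by omega) (by omega) (by norm_num)]
  rw [step_mid _ _ a3 _ (1+1+1+1) (by norm_num [pyGet7_3]) (by omega) (by omega) (by norm_num)]
  rw [step_mid _ _ a4 _ (1+1+1+1+1) (by norm_num [pyGet7_4]) (by omega) (by omega) (by norm_num)]
  rw [step_mid _ _ a5 _ (1+1+1+1+1+1) (by norm_num [pyGet7_5]) (by omega) (by omega) (by norm_num)]
  rw [step_wrap _ _ a6 _ (1+1+1+1+1+1+1) (by norm_num [pyGet7_6]) (by omega) (by omega) (by norm_num)]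
  rw [show p - a0 - a1 - a2 - a3 - a4 - a5 - a6 = p - (a0 + a1 + a2 + a3 + a4 + a5 + a6) by ring]

-- B is invariant under removing one full week (the modulo does not change)
theorem alt_skip (p a0 a1 a2 a3 a4 a5 a6 : Int) (rest : List Int)
    (hS : 0 < a0 + a1 + a2 + a3 + a4 + a5 + a6)
    (hp : a0 + a1 + a2 + a3 + a4 + a5 + a6 < p) :
    count_alt p (a0 :: a1 :: a2 :: a3 :: a4 :: a5 :: a6 :: rest) =
      count_alt (p - (a0 + a1 + a2 + a3 + a4 + a5 + a6))
        (a0 :: a1 :: a2 :: a3 :: a4 :: a5 :: a6 :: rest) := by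
  rw [count_alt, count_alt, if_neg (by omega), if_neg (by omega)]
  simp only [slice_take, List.take_succ_cons, List.take_zero, List.sum_cons, List.sum_nil]
  set S := a0 + (a1 + (a2 + (a3 + (a4 + (a5 + (a6 + 0)))))) with hSdef
  have hS' : 0 < S := by omega
  have hmod : PySem.Int.mod p S = PySem.Int.mod (p - (a0 + a1 + a2 + a3 + a4 + a5 + a6)) S := by
    rw [PySem.Int.mod_eq_emod_of_pos hS', PySem.Int.mod_eq_emod_of_pos hS',
      show p - (a0 + a1 + a2 + a3 + a4 + a5 + a6) = p - S by omega, Int.sub_emod_right]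
  rw [hmod]

theorem main_eq (a0 a1 a2 a3 a4 a5 a6 : Int) (rest : List Int)
    (h0 : 0 ≤ a0) (h1 : 0 ≤ a1) (h2 : 0 ≤ a2) (h3 : 0 ≤ a3) (h4 : 0 ≤ a4)
    (h5 : 0 ≤ a5) (h6 : 0 ≤ a6)
    (hS : 0 < a0 + a1 + a2 + a3 + a4 + a5 + a6) :
    ∀ (n : Nat) (fuel : Nat) (p : Int), p.toNat = n → 0 < p → 7 * p.toNat ≤ fuel →
      countLoop fuel p (a0 :: a1 :: a2 :: a3 :: a4 :: a5 :: a6 :: rest) 1 =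
        count_alt p (a0 :: a1 :: a2 :: a3 :: a4 :: a5 :: a6 :: rest) := by
  intro n
  induction n using Nat.strong_induction_on with
  | _ n ih =>
    intro fuel p hpn hp hfuel
    by_cases hc : p ≤ a0 + a1 + a2 + a3 + a4 + a5 + a6
    · have hc2 : p ≤ (((a0 :: a1 :: a2 :: a3 :: a4 :: a5 :: a6 :: rest).take 7).sum) := by
        simp only [List.take_succ_cons, List.take_zero, List.sum_cons, List.sum_nil]
        omega
      obtain ⟨f, rfl⟩ :
          ∃ f, fuel = f + ((a0 :: a1 :: a2 :: a3 :: a4 :: a5 :: a6 :: rest).take 7).length :=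
        ⟨fuel - 7, by simp only [List.take_succ_cons, List.take_zero, List.length_cons,
          List.length_nil]; omega⟩
      exact base_case f p _ hp hc2
    · obtain ⟨f, rfl⟩ : ∃ f, fuel = f + 1 + 1 + 1 + 1 + 1 + 1 + 1 := ⟨fuel - 7, by omega⟩
      have hc' : a0 + a1 + a2 + a3 + a4 + a5 + a6 < p := by omega
      rw [week_skip f p a0 a1 a2 a3 a4 a5 a6 rest h0 h1 h2 h3 h4 h5 h6 hc',
          alt_skip p a0 a1 a2 a3 a4 a5 a6 rest hS hc']
      exact ih (p - (a0 + a1 + a2 + a3 + a4 + a5 + a6)).toNat (by omega) f _ rfl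
        (by omega) (by omega)

-- ===== VERDICT (by name: the statement is the Claim_ definition above) =====
theorem count_spec : Claim_equal_count := by
  intro pages arr _ hpre
  unfold Spec_count
  by_cases hp : pages ≤ 0
  · obtain ⟨f, hf⟩ : ∃ f, (pages.toNat + 2) * 8 = f + 1 :=
      ⟨(pages.toNat + 2) * 8 - 1, by omega⟩
    rw [count, hf, countLoop_nonpos f pages arr 1 (by omega), count_alt, if_pos hp]
  · rcases hpre with h | hweek | ⟨hlen, hnn, hsum⟩
    · omega
    · have hlen7 : (arr.take 7).length ≤ 7 := by rw [List.length_take]; omega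
      obtain ⟨f, hf⟩ : ∃ f, (pages.toNat + 2) * 8 = f + (arr.take 7).length :=
        ⟨(pages.toNat + 2) * 8 - (arr.take 7).length, by omega⟩
      rw [count, hf]
      exact base_case f pages arr (by omega) hweek
    · match arr, hlen with
      | a0 :: a1 :: a2 :: a3 :: a4 :: a5 :: a6 :: rest, _ =>
        simp only [List.take, List.mem_cons, List.sum_cons, List.sum_nil,
          List.not_mem_nil] at hnn hsum
        have h0 := hnn a0 (by tauto)
        have h1 := hnn a1 (by tauto)
        have h2 := hnn a2 (by tauto)
        have h3 := hnn a3 (by tauto)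
        have h4 := hnn a4 (by tauto)
        have h5 := hnn a5 (by tauto)
        have h6 := hnn a6 (by tauto)
        exact main_eq a0 a1 a2 a3 a4 a5 a6 rest h0 h1 h2 h3 h4 h5 h6 (by omega)
          pages.toNat ((pages.toNat + 2) * 8) pages rfl (by omega) (by omega)
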